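-- pv_equiv track=rewrite | github.com/labhacker007/Joti | backend/app/admin/guardrails.py | validate_keywords_required
-- ===== SOURCE A (Python) =====
-- from typing import Optional, List, Dict, Any
--
-- def validate_keywords_required(text: str, config: Dict) -> tuple[bool, List[str]]:
--     """Validate that required keywords are present."""
--     violations = []
--     keywords = config.get("keywords", [])
--
--     text_lower = text.lower()
--     for keyword in keywords:
--         if keyword.lower() not in text_lower:
--             violations.append(f"Required keyword missing: {keyword}")
--
--     return len(violations) == 0, violations
-- ===== SOURCE B (Python) =====
-- def validate_keywords_required(text, config):
--     """Validate that required keywords are present."""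
--     keywords = config.get("keywords", [])
--     lowered = [kw.lower() for kw in keywords]
--     text_lower = text.lower()
--
--     # Single pass over the text: at each position, mark every keyword that starts there.
--     found = set()
--     for i in range(len(text_lower) + 1):
--         for j, kw in enumerate(lowered):
--             if text_lower.startswith(kw, i):
--                 found.add(j)
--
--     violations = [f"Required keyword missing: {kw}"
--                   for j, kw in enumerate(keywords) if j not in found]
--     return not violations, violations
-- ===== Notes on version B (the rewrite author's own statement) =====
-- stated objective: alternative
-- what changed: instead of running one substring search per keyword, B makes a single pass over the lowered text, at each position marking (in a found-set of indices) every keyword that starts there, and then reports the unmarked keywords in order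
import Mathlib
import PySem

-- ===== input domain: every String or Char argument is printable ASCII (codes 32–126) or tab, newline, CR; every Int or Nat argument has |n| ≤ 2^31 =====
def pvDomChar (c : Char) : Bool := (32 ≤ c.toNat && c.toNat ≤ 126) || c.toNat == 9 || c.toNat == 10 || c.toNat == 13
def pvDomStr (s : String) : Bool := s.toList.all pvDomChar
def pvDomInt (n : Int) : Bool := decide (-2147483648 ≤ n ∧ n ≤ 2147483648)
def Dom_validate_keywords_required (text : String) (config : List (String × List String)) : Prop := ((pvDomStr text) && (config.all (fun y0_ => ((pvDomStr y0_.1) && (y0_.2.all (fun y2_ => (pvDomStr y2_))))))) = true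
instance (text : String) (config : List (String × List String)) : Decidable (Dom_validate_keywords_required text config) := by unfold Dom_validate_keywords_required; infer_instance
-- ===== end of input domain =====

-- B finds the keywords in a single pass over the text (a position scan marking every keyword at the
-- position where it starts) instead of a separate substring search per keyword (alternative, not faster).


-- ===== PORT A =====
def validate_keywords_required (text : String) (config : List (String × List String)) : Bool × List String :=
  let keywords := (PySem.Dict.mk config).getD "keywords" []
  let text_lower := PySem.Str.lower text
  let violations := keywords.foldl (fun acc keyword =>
      if !(PySem.Str.isIn (PySem.Str.lower keyword) text_lower) then
        acc ++ ["Required keyword missing: " ++ keyword]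
      else acc) []
  (decide (violations.length = 0), violations)

-- ===== PORT B =====
-- Source B's scan loop:  for i in range(len(text_lower) + 1): for j, kw in enumerate(lowered):
--   if text_lower.startswith(kw, i): found.add(j)
-- text_lower.startswith(kw, i) with 0 ≤ i ≤ len(text_lower) is exactly
-- PySem.Chars.startswith (text_lower.drop i) kw, and range(n) is List.range n.
def altScan (tl : List Char) (lowered : List (List Char)) : PySem.Set Int :=
  (List.range (tl.length + 1)).foldl (fun found i =>
    (PySem.List.enumerate lowered).foldl (fun f jk =>
      if PySem.Chars.startswith (tl.drop i) jk.2 then PySem.Set.add f jk.1 else f) found)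
    PySem.Set.empty

def validate_keywords_required_alt (text : String) (config : List (String × List String)) : Bool × List String :=
  let keywords := (PySem.Dict.mk config).getD "keywords" []
  let lowered := keywords.map PySem.Str.lower
  let text_lower := (PySem.Str.lower text).toList
  let found := altScan text_lower (lowered.map String.toList)
  let violations := ((PySem.List.enumerate keywords).filter
      (fun jk => !(PySem.Set.contains found jk.1))).map
      (fun jk => "Required keyword missing: " ++ jk.2)
  (violations.isEmpty, violations)

-- ===== PRECONDITION & SPEC =====
def Spec_validate_keywords_required (text : String) (config : List (String × List String)) (out : Bool × List String) : Prop := out = validate_keywords_required_alt text config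
instance (text : String) (config : List (String × List String)) (out : Bool × List String) : Decidable (Spec_validate_keywords_required text config out) := by unfold Spec_validate_keywords_required; infer_instance

-- ===== CLAIM (what is proved, stated in full; the proofs are below) =====
def Claim_equal_validate_keywords_required : Prop := ∀ (text : String) (config : List (String × List String)), Dom_validate_keywords_required text config → Spec_validate_keywords_required text config (validate_keywords_required text config)

-- ===== LEMMAS AND PROOFS =====

-- membership after the inner fold over the enumerated keyword list
theorem mem_fold_add (C : Int × List Char → Bool) (ps : List (Int × List Char)) (f : PySem.Set Int) (j : Int) :
    (j ∈ ps.foldl (fun f jk => if C jk then PySem.Set.add f jk.1 else f) f) ↔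
      j ∈ f ∨ ∃ kw, (j, kw) ∈ ps ∧ C (j, kw) = true := by
  induction ps generalizing f with
  | nil => simp
  | cons p ps ih =>
      obtain ⟨a, b⟩ := p
      by_cases h : C (a, b) = true
      · simp only [List.foldl_cons, ih, h, if_pos, PySem.Set.mem_add, List.mem_cons, Prod.mk.injEq]
        constructor
        · rintro ((hj | rfl) | ⟨kw, hk, hc⟩)
          · exact Or.inl hj
          · exact Or.inr ⟨b, Or.inl ⟨rfl, rfl⟩, h⟩
          · exact Or.inr ⟨kw, Or.inr hk, hc⟩
        · rintro (hj | ⟨kw, (⟨rfl, rfl⟩ | hk), hc⟩)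
          · exact Or.inl (Or.inl hj)
          · exact Or.inl (Or.inr rfl)
          · exact Or.inr ⟨kw, hk, hc⟩
      · simp only [List.foldl_cons, ih, h, Bool.false_eq_true, List.mem_cons, Prod.mk.injEq]
        constructor
        · rintro (hj | ⟨kw, hk, hc⟩)
          · exact Or.inl hj
          · exact Or.inr ⟨kw, Or.inr hk, hc⟩
        · rintro (hj | ⟨kw, (⟨rfl, rfl⟩ | hk), hc⟩)
          · exact Or.inl hj
          · exact absurd hc h
          · exact Or.inr ⟨kw, hk, hc⟩

-- membership after the outer fold over the text positions
theorem mem_outer (tl : List Char) (lowered : List (List Char)) (rs : List Nat) (f : PySem.Set Int) (j : Int) :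
    (j ∈ rs.foldl (fun found i =>
      (PySem.List.enumerate lowered).foldl (fun f jk =>
        if PySem.Chars.startswith (tl.drop i) jk.2 then PySem.Set.add f jk.1 else f) found) f) ↔
      j ∈ f ∨ ∃ i ∈ rs, ∃ kw, (j, kw) ∈ PySem.List.enumerate lowered ∧
        PySem.Chars.startswith (tl.drop i) kw = true := by
  induction rs generalizing f with
  | nil => simp
  | cons r rs ih =>
      simp only [List.foldl_cons, ih, mem_fold_add, List.mem_cons]
      constructor
      · rintro ((hj | ⟨kw, hk, hc⟩) | ⟨i, hi, hk⟩)
        · exact Or.inl hj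
        · exact Or.inr ⟨r, Or.inl rfl, kw, hk, hc⟩
        · exact Or.inr ⟨i, Or.inr hi, hk⟩
      · rintro (hj | ⟨i, (rfl | hi), hk⟩)
        · exact Or.inl (Or.inl hj)
        · exact Or.inl (Or.inr hk)
        · exact Or.inr ⟨i, hi, hk⟩

-- the scan finds exactly the keywords occurring in the text
theorem mem_altScan (tl : List Char) (lowered : List (List Char)) (j : Int) :
    (j ∈ altScan tl lowered) ↔ ∃ kw, (j, kw) ∈ PySem.List.enumerate lowered ∧
      PySem.Chars.isIn kw tl = true := by
  unfold altScan
  rw [mem_outer]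
  simp only [PySem.Set.empty, List.not_mem_nil, false_or, List.mem_range]
  constructor
  · rintro ⟨i, _, kw, hk, hc⟩
    refine ⟨kw, hk, ?_⟩
    rw [← PySem.Chars.exists_prefix_drop_iff_isIn]
    exact ⟨i, (PySem.Chars.startswith_iff _ _).mp hc⟩
  · rintro ⟨kw, hk, hc⟩
    rw [← PySem.Chars.exists_prefix_drop_iff_isIn] at hc
    obtain ⟨i, hi⟩ := hc
    by_cases hle : i ≤ tl.length
    · exact ⟨i, by omega, kw, hk, (PySem.Chars.startswith_iff _ _).mpr hi⟩
    · refine ⟨tl.length, by omega, kw, hk, (PySem.Chars.startswith_iff _ _).mpr ?_⟩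
      rw [List.drop_length]
      rw [List.drop_eq_nil_of_le (by omega)] at hi
      exact hi

theorem enum_filter_map_msg (ks : List String) (q : String → Bool) (s : Int) :
    ((PySem.List.enumerate ks s).filter (fun jk => q jk.2)).map
        (fun jk => "Required keyword missing: " ++ jk.2)
      = (ks.filter q).map (fun k => "Required keyword missing: " ++ k) := by
  induction ks generalizing s with
  | nil => simp [PySem.List.enumerate_nil]
  | cons k ks ih =>
      rw [PySem.List.enumerate_cons]
      by_cases h : q k
      · simp [h, ih]
      · simp [h, ih]

theorem contains_altScan (text : String) (k : List String) (m : Nat) (hm : m < k.length) :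
    PySem.Set.contains (altScan (PySem.Str.lower text).toList ((k.map PySem.Str.lower).map String.toList)) ((0 : Int) + m)
      = PySem.Str.isIn (PySem.Str.lower k[m]) (PySem.Str.lower text) := by
  rw [Bool.eq_iff_iff, PySem.Set.contains_iff, mem_altScan, PySem.Str.isIn_eq]
  constructor
  · rintro ⟨kw', hmem, hin⟩
    rw [PySem.List.mem_enumerate_iff] at hmem
    obtain ⟨m', hm', hp⟩ := hmem
    rw [Prod.mk.injEq] at hp
    obtain ⟨h1, h2⟩ := hp
    have : m = m' := by exact_mod_cast by omega
    subst this
    simpa [h2] using hin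
  · intro hin
    refine ⟨((k.map PySem.Str.lower).map String.toList)[m]'(by simpa using hm), ?_, ?_⟩
    · rw [PySem.List.mem_enumerate_iff]
      exact ⟨m, by simpa using hm, rfl⟩
    · simpa using hin

-- ===== VERDICT (by name: the statement is the Claim_ definition above) =====
theorem validate_keywords_required_spec : Claim_equal_validate_keywords_required := by
  intro text config _
  unfold Spec_validate_keywords_required validate_keywords_required validate_keywords_required_alt
  simp only [PySem.List.foldl_append_if, List.nil_append]
  have hfilter : (PySem.List.enumerate ((PySem.Dict.mk config).getD "keywords" [])).filter
      (fun jk => !(PySem.Set.contains (altScan (PySem.Str.lower text).toList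
        ((((PySem.Dict.mk config).getD "keywords" []).map PySem.Str.lower).map String.toList)) jk.1))
      = (PySem.List.enumerate ((PySem.Dict.mk config).getD "keywords" [])).filter
      (fun jk => !(PySem.Str.isIn (PySem.Str.lower jk.2) (PySem.Str.lower text))) := by
    apply List.filter_congr
    intro jk hjk
    rw [PySem.List.mem_enumerate_iff] at hjk
    obtain ⟨m, hm, hp⟩ := hjk
    subst hp
    simp only
    rw [contains_altScan text _ m hm]
  rw [hfilter, enum_filter_map_msg _ (fun x => !PySem.Str.isIn (PySem.Str.lower x) (PySem.Str.lower text)) 0]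
  rw [Prod.mk.injEq]
  refine ⟨?_, rfl⟩
  rw [Bool.eq_iff_iff]
  simp [List.isEmpty_iff, List.length_eq_zero_iff]
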